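-- pv_equiv track=rewrite | github.com/yshinkarev/my-bash | utils/mitmproxy/mitm.py | format_map_local
-- ===== SOURCE A (Python) =====
-- def format_map_local(map):
--     if map is None:
--         return None
--
--     new_map = {}
--     for key in map:
--         values = map[key]
--         if key == 'urls':  # Remove extra spaces between method and url.
--             urls = map[key]
--             new_urls = {}
--             for urlKey in urls:
--                 split_url_key = [x for x in urlKey.split(' ') if x]
--                 new_urls[" ".join(split_url_key)] = urls[urlKey]
--             new_map[key] = new_urls
--         else:
--             new_map[key] = values
--     return new_map
-- ===== SOURCE B (Python) =====
-- def _squeeze(key):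
--     out = []
--     pending = False
--     for ch in key:
--         if ch == ' ':
--             pending = bool(out)
--         else:
--             if pending:
--                 out.append(' ')
--                 pending = False
--             out.append(ch)
--     return ''.join(out)
--
--
-- def _fix_urls(urls):
--     return {_squeeze(u): w for (u, w) in urls.items()}
--
--
-- def format_map_local(map):
--     if map is None:
--         return None
--     return {k: (_fix_urls(v) if k == 'urls' else v) for (k, v) in map.items()}
-- ===== Notes on version B (the rewrite author's own statement) =====
-- stated objective: alternative
-- what changed: B normalizes each url key with a one-pass character state machine (out list plus pending-space flag) instead of A's split/filter/join, and rebuilds the map with dict comprehensions over the (key, value) item pairs instead of A's key loop with repeated map[key] lookups and an in-loop branch body.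
import Mathlib
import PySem

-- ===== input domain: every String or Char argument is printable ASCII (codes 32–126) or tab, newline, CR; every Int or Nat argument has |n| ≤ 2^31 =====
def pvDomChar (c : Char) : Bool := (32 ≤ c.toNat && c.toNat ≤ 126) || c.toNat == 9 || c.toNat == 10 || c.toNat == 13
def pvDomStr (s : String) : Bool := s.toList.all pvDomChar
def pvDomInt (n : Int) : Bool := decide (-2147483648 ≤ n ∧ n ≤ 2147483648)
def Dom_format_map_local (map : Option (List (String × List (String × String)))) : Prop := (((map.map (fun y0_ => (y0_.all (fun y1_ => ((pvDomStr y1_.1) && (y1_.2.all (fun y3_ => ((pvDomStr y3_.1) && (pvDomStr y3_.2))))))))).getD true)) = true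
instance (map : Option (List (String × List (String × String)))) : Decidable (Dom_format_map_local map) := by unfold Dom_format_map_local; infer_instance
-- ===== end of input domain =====

-- B replaces A's split/filter/join key normalization by a one-pass character state machine
-- (pending-space flag) and A's loop-with-lookups by comprehensions over the item pairs;
-- objective: alternative (return-value equivalence; neither mutates its argument).

-- ===== PORT A =====
-- " ".join([x for x in urlKey.split(' ') if x])  (A's normalization expression)
def pvNormKey (k : String) : String :=
  PySem.Str.join " " (((PySem.Str.split? k " ").getD []).filter (fun x => x != ""))

-- A's inner loop: new_urls built with urls[urlKey] first-match lookups
def pvFmtUrls (urls : List (String × String)) : List (String × String) :=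
  (urls.foldl
    (fun new_urls p =>
      PySem.Dict.insert new_urls (pvNormKey p.1) (((PySem.Dict.mk urls).get? p.1).getD ""))
    PySem.Dict.empty).items

def format_map_local (map : Option (List (String × List (String × String)))) : Option (List (String × List (String × String))) :=
  match map with
  | none => none
  | some m =>
    some ((m.foldl
      (fun new_map kv =>
        let values := ((PySem.Dict.mk m).get? kv.1).getD []
        if kv.1 == "urls" then
          let urls := ((PySem.Dict.mk m).get? kv.1).getD []
          PySem.Dict.insert new_map kv.1 (pvFmtUrls urls)
        else
          PySem.Dict.insert new_map kv.1 values)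
      PySem.Dict.empty).items)

-- ===== PORT B =====
-- _squeeze: one-pass state machine over the characters (out, pending-space flag)

def pvSqueeze (k : String) : String :=
  String.ofList
    ((k.toList.foldl
      (fun (st : List Char × Bool) ch =>
        if ch == ' ' then (st.1, !st.1.isEmpty)
        else (st.1 ++ (if st.2 then [' '] else []) ++ [ch], false))
      ([], false)).1)

-- _fix_urls: dict comprehension over the (u, w) item pairs
def pvFixUrls (urls : List (String × String)) : List (String × String) :=
  (urls.foldl (fun d p => PySem.Dict.insert d (pvSqueeze p.1) p.2) PySem.Dict.empty).items

-- the outer dict comprehension over the (k, v) item pairs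
def format_map_local_alt (map : Option (List (String × List (String × String)))) : Option (List (String × List (String × String))) :=
  match map with
  | none => none
  | some m =>
    some ((m.foldl
      (fun d kv => PySem.Dict.insert d kv.1 (if kv.1 == "urls" then pvFixUrls kv.2 else kv.2))
      PySem.Dict.empty).items)

-- ===== PRECONDITION & SPEC =====
-- Pre_ excludes association lists with duplicate keys (at either level): a Python dict cannot
-- contain duplicate keys, so such inputs do not represent any input A accepts.
def Pre_format_map_local (map : Option (List (String × List (String × String)))) : Prop :=
  (((map.getD []).map Prod.fst).Nodup) ∧ ∀ p ∈ map.getD [], (p.2.map Prod.fst).Nodup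
instance (map : Option (List (String × List (String × String)))) : Decidable (Pre_format_map_local map) := by unfold Pre_format_map_local; infer_instance

def pvWitness_format_map_local : (Option (List (String × List (String × String)))) :=
  some [("urls", [("GET   /a", "1"), ("POST /b", "2")]), ("x", [("k", "v")])]

def Spec_format_map_local (map : Option (List (String × List (String × String)))) (out : Option (List (String × List (String × String)))) : Prop := out = format_map_local_alt map
instance (map : Option (List (String × List (String × String)))) (out : Option (List (String × List (String × String)))) : Decidable (Spec_format_map_local map out) := by unfold Spec_format_map_local; infer_instance

-- ===== CLAIM (what is proved, stated in full; the proofs are below) =====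
def Claim_equal_format_map_local : Prop := ∀ (map : Option (List (String × List (String × String)))), Dom_format_map_local map → Pre_format_map_local map → Spec_format_map_local map (format_map_local map)

-- ===== LEMMAS AND PROOFS =====

-- ---- step 1: Python's s.split(' ') as a structural recursion on the characters ----
def pvSplit1 : List Char → List (List Char)
  | [] => [[]]
  | c :: r =>
    if c = ' ' then [] :: pvSplit1 r
    else match pvSplit1 r with
         | h :: t => (c :: h) :: t
         | [] => [[c]]

def pvCons1 (p : List Char) : List (List Char) → List (List Char)
  | h :: t => (p ++ h) :: t
  | [] => [p]

theorem pvSplit1_ne_nil (l : List Char) : pvSplit1 l ≠ [] := by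
  cases l with
  | nil => simp [pvSplit1]
  | cons c r =>
    simp only [pvSplit1]
    split
    · simp
    · split <;> simp

theorem pv_go_eq (fuel : Nat) : ∀ (l cur : List Char) (accs : List (List Char)),
    l.length < fuel →
    PySem.Chars.splitOn.go [' '] fuel l cur accs
      = accs.reverse ++ pvCons1 cur.reverse (pvSplit1 l) := by
  induction fuel with
  | zero => intro l cur accs h; omega
  | succ fuel ih =>
    intro l cur accs h
    cases l with
    | nil =>
      simp [PySem.Chars.splitOn.go, pvSplit1, pvCons1]
    | cons c rest =>
      simp only [PySem.Chars.splitOn.go]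
      by_cases hc : c = ' '
      · have hpre : [' '].isPrefixOf (c :: rest) = true := by
          simp [List.isPrefixOf, hc]
        rw [if_pos hpre]
        have hdrop : List.drop [' '].length (c :: rest) = rest := by simp
        rw [hdrop]
        rw [ih rest [] (cur.reverse :: accs) (by simpa using Nat.lt_of_succ_lt_succ h)]
        simp only [pvSplit1, if_pos hc]
        cases hs : pvSplit1 rest with
        | nil => exact absurd hs (pvSplit1_ne_nil rest)
        | cons hh tt => simp [pvCons1]
      · have hpre : [' '].isPrefixOf (c :: rest) = false := by
          simp [List.isPrefixOf]
          intro hcc; exact absurd hcc.symm hc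
        rw [if_neg (by simp [hpre])]
        rw [ih rest (c :: cur) accs (by simpa using Nat.lt_of_succ_lt_succ h)]
        simp only [pvSplit1, if_neg hc]
        cases hs : pvSplit1 rest with
        | nil => exact absurd hs (pvSplit1_ne_nil rest)
        | cons hh tt => simp [pvCons1]

theorem pv_splitOn_space (cs : List Char) :
    PySem.Chars.splitOn cs [' '] = pvSplit1 cs := by
  unfold PySem.Chars.splitOn
  rw [pv_go_eq (cs.length + 1) cs [] [] (by omega)]
  cases hs : pvSplit1 cs with
  | nil => exact absurd hs (pvSplit1_ne_nil cs)
  | cons h t => simp [pvCons1]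

-- ---- step 2: B's state machine as a structural recursion ----
def pvJ : Bool → Bool → List Char → List Char
  | _, _, [] => []
  | p, b, c :: r =>
    if c = ' ' then pvJ b b r
    else (if p then [' '] else []) ++ c :: pvJ false true r

theorem pv_foldl_eq_J (cs : List Char) : ∀ (out : List Char) (p : Bool),
    (cs.foldl
      (fun (st : List Char × Bool) ch =>
        if ch == ' ' then (st.1, !st.1.isEmpty)
        else (st.1 ++ (if st.2 then [' '] else []) ++ [ch], false))
      (out, p)).1
    = out ++ pvJ p (!out.isEmpty) cs := by
  induction cs with
  | nil => intro out p; simp [pvJ]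
  | cons c r ih =>
    intro out p
    simp only [List.foldl_cons]
    by_cases hc : c = ' '
    · simp only [hc, beq_self_eq_true, if_pos]
      rw [ih out (!out.isEmpty)]
      simp [pvJ]
    · have hbc : (c == ' ') = false := by simp [hc]
      simp only [hbc, Bool.false_eq_true, if_false]
      rw [ih (out ++ (if p then [' '] else []) ++ [c]) false]
      have hne : ((out ++ (if p then [' '] else []) ++ [c]).isEmpty) = false := by
        simp
      rw [hne]
      simp [pvJ, hc]

-- ---- step 3: the two normalizations agree on the character lists ----
def pvTailW (t : List (List Char)) : List Char :=
  if t.filter (· ≠ []) = [] then [] else ' ' :: [' '].intercalate (t.filter (· ≠ []))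

theorem pv_filter_cons_nil (t : List (List Char)) :
    (([] :: t).filter (fun x => decide (x ≠ []))) = t.filter (fun x => decide (x ≠ [])) := by
  simp

theorem pv_filter_cons_ne (x : List Char) (hx : x ≠ []) (t : List (List Char)) :
    ((x :: t).filter (fun x => decide (x ≠ []))) = x :: t.filter (fun x => decide (x ≠ [])) := by
  rw [List.filter_cons_of_pos (by simpa using hx)]

theorem pvTailW_cons_nil (t : List (List Char)) : pvTailW ([] :: t) = pvTailW t := by
  unfold pvTailW
  rw [pv_filter_cons_nil]

theorem pv_inter_cons (x : List Char) (hx : x ≠ []) (t : List (List Char)) :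
    [' '].intercalate (((x :: t).filter (fun x => decide (x ≠ [])))) = x ++ pvTailW t := by
  rw [pv_filter_cons_ne x hx t]
  unfold pvTailW
  cases ht : t.filter (fun x => decide (x ≠ [])) with
  | nil => simp [List.intercalate]
  | cons y ys =>
    rw [if_neg (by simp)]
    show [' '].intercalate (x :: y :: ys) = x ++ ' ' :: [' '].intercalate (y :: ys)
    simp [List.intercalate, List.intersperse]

theorem pv_J_split1 (r : List Char) :
    pvJ true true r = pvTailW (pvSplit1 r)
    ∧ pvJ false true r = (pvSplit1 r).headI ++ pvTailW (pvSplit1 r).tail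
    ∧ pvJ false false r = [' '].intercalate ((pvSplit1 r).filter (fun x => decide (x ≠ []))) := by
  induction r with
  | nil =>
    refine ⟨?_, ?_, ?_⟩ <;> simp [pvJ, pvSplit1, pvTailW, List.intercalate]
  | cons c rest ih =>
    obtain ⟨ih1, ih2, ih3⟩ := ih
    by_cases hc : c = ' '
    · have hsp : pvSplit1 (c :: rest) = [] :: pvSplit1 rest := by
        simp [pvSplit1, hc]
      refine ⟨?_, ?_, ?_⟩
      · show pvJ true true (c :: rest) = pvTailW (pvSplit1 (c :: rest))
        rw [hsp, pvTailW_cons_nil, ← ih1]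
        simp [pvJ, hc]
      · rw [hsp]
        show pvJ false true (c :: rest) = [] ++ pvTailW (pvSplit1 rest)
        rw [List.nil_append, ← ih1]
        simp [pvJ, hc]
      · rw [hsp, pv_filter_cons_nil, ← ih3]
        simp [pvJ, hc]
    · obtain ⟨h, t, hs⟩ : ∃ h t, pvSplit1 rest = h :: t := by
        cases hq : pvSplit1 rest with
        | nil => exact absurd hq (pvSplit1_ne_nil rest)
        | cons a b => exact ⟨a, b, rfl⟩
      have hsp : pvSplit1 (c :: rest) = (c :: h) :: t := by
        simp [pvSplit1, hc, hs]
      have hkey : pvJ false true rest = h ++ pvTailW t := by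
        rw [ih2, hs]
        rfl
      refine ⟨?_, ?_, ?_⟩
      · rw [hsp]
        show pvJ true true (c :: rest) = pvTailW ((c :: h) :: t)
        have : pvTailW ((c :: h) :: t) = ' ' :: ((c :: h) ++ pvTailW t) := by
          conv_lhs => unfold pvTailW
          rw [if_neg (by rw [pv_filter_cons_ne (c :: h) (by simp) t]; simp),
              pv_inter_cons (c :: h) (by simp) t]
        rw [this]
        simp [pvJ, hc, hkey]
      · rw [hsp]
        show pvJ false true (c :: rest) = (c :: h) ++ pvTailW t
        simp [pvJ, hc, hkey]
      · rw [hsp, pv_inter_cons (c :: h) (by simp) t]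
        simp [pvJ, hc, hkey]

theorem pv_ofList_ne (x : List Char) : (String.ofList x != "") = decide (x ≠ []) := by
  rcases x with _ | ⟨c, r⟩
  · simp
  · simp only [ne_eq, decide_not]
    have : String.ofList (c :: r) ≠ "" := by
      intro hcon
      have := congrArg String.toList hcon
      simp at this
    simp [this]

theorem pv_join_ofList (ws : List (List Char)) :
    PySem.Str.join " " (ws.map String.ofList) = String.ofList ([' '].intercalate ws) := by
  simp only [PySem.Str.join, PySem.Chars.join, List.map_map]
  congr 1
  congr 1
  conv_rhs => rw [← List.map_id ws]
  apply List.map_congr_left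
  intro x _
  simp [Function.comp]

theorem pv_norm_eq_squeeze (k : String) : pvNormKey k = pvSqueeze k := by
  unfold pvNormKey pvSqueeze
  have hsep : (" " : String).toList = [' '] := by decide
  have hsplit : PySem.Str.split? k " "
      = some ((pvSplit1 k.toList).map String.ofList) := by
    simp only [PySem.Str.split?, PySem.Chars.split?, hsep]
    rw [if_neg (by simp), pv_splitOn_space]
    rfl
  rw [hsplit]
  simp only [Option.getD_some]
  have hfilt : ((pvSplit1 k.toList).map String.ofList).filter (fun x => x != "")
      = ((pvSplit1 k.toList).filter (fun x => decide (x ≠ []))).map String.ofList := by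
    rw [List.filter_map]
    congr 1
    apply List.filter_congr
    intro x _
    simp only [Function.comp]
    exact pv_ofList_ne x
  rw [hfilt, pv_join_ofList]
  rw [pv_foldl_eq_J k.toList [] false]
  simp only [List.isEmpty_nil, Bool.not_true, List.nil_append]
  rw [(pv_J_split1 k.toList).2.2]

-- ---- step 4: the inner url loops agree (keys distinct) ----
theorem pv_fmtUrls_eq (urls : List (String × String)) (h : (urls.map Prod.fst).Nodup) :
    pvFmtUrls urls = pvFixUrls urls := by
  unfold pvFmtUrls pvFixUrls
  congr 1
  apply PySem.List.foldl_congr_mem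
  intro acc p hp
  have hget : ((PySem.Dict.mk urls).get? p.1).getD "" = p.2 := by
    rw [PySem.Dict.get?_of_mem_items (PySem.Dict.mk urls) (k := p.1) (v := p.2) hp h]
    rfl
  rw [hget, pv_norm_eq_squeeze]

-- ---- step 5: the outer structures agree ----
theorem pv_a_items (m : List (String × List (String × String)))
    (h : (m.map Prod.fst).Nodup) :
    (m.foldl
      (fun new_map kv =>
        let values := ((PySem.Dict.mk m).get? kv.1).getD []
        if kv.1 == "urls" then
          let urls := ((PySem.Dict.mk m).get? kv.1).getD []
          PySem.Dict.insert new_map kv.1 (pvFmtUrls urls)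
        else
          PySem.Dict.insert new_map kv.1 values)
      PySem.Dict.empty).items
    = m.map (fun kv => if kv.1 == "urls" then (kv.1, pvFmtUrls kv.2) else kv) := by
  have hk : ((PySem.Dict.mk m) : PySem.Dict String (List (String × String))).keys.Nodup := h
  have hget : ∀ kv ∈ m, ((PySem.Dict.mk m).get? kv.1).getD [] = kv.2 := by
    intro kv hkv
    rw [PySem.Dict.get?_of_mem_items (PySem.Dict.mk m) (k := kv.1) (v := kv.2) hkv hk]
    rfl
  rw [PySem.List.foldl_congr_mem m _
      (fun new_map kv =>
        PySem.Dict.insert new_map kv.1 (if kv.1 == "urls" then pvFmtUrls kv.2 else kv.2))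
      PySem.Dict.empty
      (by
        intro acc kv hkv
        simp only [hget kv hkv]
        by_cases hu : kv.1 == "urls" <;> simp [hu])]
  rw [PySem.Dict.items_foldl_insert_fresh m Prod.fst
        (fun kv => if kv.1 == "urls" then pvFmtUrls kv.2 else kv.2) PySem.Dict.empty
        (fun a _ => rfl) h]
  simp only [PySem.Dict.empty, List.nil_append]
  apply List.map_congr_left
  intro kv _
  by_cases hu : kv.1 == "urls"
  · simp [eq_of_beq hu]
  · simp [hu]

theorem pv_b_items (m : List (String × List (String × String)))
    (h : (m.map Prod.fst).Nodup) :
    (m.foldl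
      (fun d kv => PySem.Dict.insert d kv.1 (if kv.1 == "urls" then pvFixUrls kv.2 else kv.2))
      PySem.Dict.empty).items
    = m.map (fun kv => (kv.1, if kv.1 == "urls" then pvFixUrls kv.2 else kv.2)) := by
  rw [PySem.Dict.items_foldl_insert_fresh m Prod.fst
        (fun kv => if kv.1 == "urls" then pvFixUrls kv.2 else kv.2) PySem.Dict.empty
        (fun a _ => rfl) h]
  simp [PySem.Dict.empty]

-- ===== VERDICT (by name: the statement is the Claim_ definition above) =====
theorem format_map_local_spec : Claim_equal_format_map_local := by
  intro map _ hpre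
  unfold Spec_format_map_local
  cases map with
  | none => rfl
  | some m =>
    obtain ⟨h1, h2⟩ := hpre
    simp only [Option.getD_some] at h1 h2
    show format_map_local (some m) = format_map_local_alt (some m)
    unfold format_map_local format_map_local_alt
    simp only
    rw [pv_a_items m h1, pv_b_items m h1]
    congr 1
    apply List.map_congr_left
    intro kv hkv
    by_cases hu : kv.1 == "urls"
    · simp [hu, pv_fmtUrls_eq kv.2 (h2 kv hkv)]
    · simp [hu]
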